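-- pv_equiv track=rewrite | github.com/VAKhoa939/AI_GitHub | finalProject/function.py | goal_point
-- ===== SOURCE A (Python) =====
-- def goal_point(A):
--     goal = 0
--     for i in range (len(A)):
--         for j in range (len(A[i])):
--             if A[i][j] == 1 :
--                 goal += 10
--             if A[i][j] ==  2:
--                 goal += 50
--     return goal
-- ===== SOURCE B (Python) =====
-- def goal_point(A):
--     flat = [v for row in A for v in row]
--     return 10 * flat.count(1) + 50 * flat.count(2)
-- ===== Notes on version B (the rewrite author's own statement) =====
-- stated objective: simpler
-- what changed: Replaces the index-driven nested loops with per-cell conditionals by flattening the grid once and returning the closed-form weighted sum 10*count(1) + 50*count(2).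
import Mathlib
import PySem

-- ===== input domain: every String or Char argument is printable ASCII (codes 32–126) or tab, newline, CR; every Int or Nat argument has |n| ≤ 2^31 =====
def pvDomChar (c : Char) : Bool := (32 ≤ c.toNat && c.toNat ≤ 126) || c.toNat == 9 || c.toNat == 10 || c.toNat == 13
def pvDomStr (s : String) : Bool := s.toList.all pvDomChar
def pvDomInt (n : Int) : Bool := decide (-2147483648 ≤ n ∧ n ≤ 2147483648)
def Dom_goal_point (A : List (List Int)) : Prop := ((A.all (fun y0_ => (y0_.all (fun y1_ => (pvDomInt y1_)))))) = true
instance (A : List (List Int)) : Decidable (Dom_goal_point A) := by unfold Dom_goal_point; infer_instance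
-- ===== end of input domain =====

-- B flattens the grid once and returns the closed-form weighted sum 10*count(1)+50*count(2) (simpler).
-- ===== PORT A =====
-- literal port: for i in range(len(A)): for j in range(len(A[i])): two independent ifs on the cell
def goal_point (A : List (List Int)) : Int :=
  (List.range A.length).foldl (fun goal i =>
    let row := A.getD i []
    (List.range row.length).foldl (fun goal j =>
      let goal := if row.getD j 0 = 1 then goal + 10 else goal
      if row.getD j 0 = 2 then goal + 50 else goal) goal) 0

-- ===== PORT B =====
def goal_point_alt (A : List (List Int)) : Int :=
  let flat := A.flatMap (fun row => row)
  10 * (flat.count 1 : Int) + 50 * (flat.count 2 : Int)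

-- ===== PRECONDITION & SPEC =====
def Spec_goal_point (A : List (List Int)) (out : Int) : Prop := out = goal_point_alt A
instance (A : List (List Int)) (out : Int) : Decidable (Spec_goal_point A out) := by unfold Spec_goal_point; infer_instance

-- ===== CLAIM (what is proved, stated in full; the proofs are below) =====
def Claim_equal_goal_point : Prop := ∀ (A : List (List Int)), Dom_goal_point A → Spec_goal_point A (goal_point A)

-- ===== LEMMAS AND PROOFS =====

-- index-foldl over range(len xs) with getD equals foldl over the list itself
theorem map_range_getD {α : Type} (xs : List α) (d : α) :
    (List.range xs.length).map (fun i => xs.getD i d) = xs := by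
  apply List.ext_getElem
  · simp
  · intro i h1 h2
    simp [List.getD_eq_getElem?_getD, List.getElem?_eq_getElem h2]

theorem foldl_range_getD {α β : Type} (xs : List α) (d : α) (f : β → α → β) (init : β) :
    (List.range xs.length).foldl (fun acc i => f acc (xs.getD i d)) init = xs.foldl f init := by
  rw [← List.foldl_map, map_range_getD]

theorem inner_loop_eq (row : List Int) (g : Int) :
    row.foldl (fun goal v =>
      if v = 2 then (if v = 1 then goal + 10 else goal) + 50
      else if v = 1 then goal + 10 else goal) g
    = g + 10 * (row.count 1 : Int) + 50 * (row.count 2 : Int) := by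
  induction row generalizing g with
  | nil => simp
  | cons v t ih =>
      simp only [List.foldl_cons, ih, List.count_cons]
      by_cases h1 : v = 1 <;> by_cases h2 : v = 2 <;>
        simp [h1, h2] <;> push_cast <;> ring_nf <;> omega

theorem outer_loop_eq (t : List (List Int)) (g : Int) :
    t.foldl (fun goal row =>
      (List.range row.length).foldl (fun goal j =>
        if row.getD j 0 = 2 then (if row.getD j 0 = 1 then goal + 10 else goal) + 50
        else if row.getD j 0 = 1 then goal + 10 else goal) goal) g
    = g + 10 * ((t.flatMap (fun r => r)).count 1 : Int)
        + 50 * ((t.flatMap (fun r => r)).count 2 : Int) := by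
  induction t generalizing g with
  | nil => simp
  | cons r s ihs =>
      simp only [List.foldl_cons, List.flatMap_cons, List.count_append]
      rw [foldl_range_getD r 0
        (fun goal v => if v = 2 then (if v = 1 then goal + 10 else goal) + 50
          else if v = 1 then goal + 10 else goal) g, inner_loop_eq, ihs]
      push_cast; ring

theorem goal_point_eq (A : List (List Int)) :
    goal_point A = goal_point_alt A := by
  simp only [goal_point, goal_point_alt]
  rw [foldl_range_getD A []
    (fun goal row =>
      (List.range row.length).foldl (fun goal j =>
        if row.getD j 0 = 2 then (if row.getD j 0 = 1 then goal + 10 else goal) + 50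
        else if row.getD j 0 = 1 then goal + 10 else goal) goal) 0]
  rw [outer_loop_eq]
  push_cast; ring

-- ===== VERDICT (by name: the statement is the Claim_ definition above) =====
theorem goal_point_spec : Claim_equal_goal_point := by
  intro A _
  exact goal_point_eq A
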